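-- pv_equiv track=rewrite | github.com/rmax-ai/ai-first-software-engineering-book | state/kernel.py | _changed_sections
-- ===== SOURCE A (Python) =====
-- def _split_h2_sections(text: str) -> dict[str, str]:
--     """Return a mapping of `## Heading` -> section body (excluding the heading line)."""
--
--     lines = text.splitlines(keepends=True)
--     sections: dict[str, list[str]] = {}
--     current: str | None = None
--     for line in lines:
--         if line.startswith("## "):
--             current = line.strip("\n")
--             sections.setdefault(current, [])
--             continue
--         if current is not None:
--             sections[current].append(line)
--     return {k: "".join(v).strip() for k, v in sections.items()}
--
-- def _changed_sections(old: str, new: str) -> set[str]: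
--     a = _split_h2_sections(old)
--     b = _split_h2_sections(new)
--     changed: set[str] = set()
--     for h in set(a.keys()) | set(b.keys()):
--         if a.get(h, "") != b.get(h, ""):
--             changed.add(h)
--     return changed
-- ===== SOURCE B (Python) =====
-- def _split_sections(text: str) -> dict[str, str]:
--     """Chunk the text into (heading, body) blocks and merge duplicate headings."""
--     lines = text.splitlines(keepends=True)
--     sections: dict[str, str] = {}
--     i, n = 0, len(lines)
--     while i < n:
--         if lines[i].startswith("## "):
--             heading = lines[i].strip("\n")
--             j = i + 1
--             while j < n and not lines[j].startswith("## "):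
--                 j += 1
--             sections[heading] = sections.get(heading, "") + "".join(lines[i + 1:j])
--             i = j
--         else:
--             i += 1
--     return {k: v.strip() for k, v in sections.items()}
--
--
-- def _changed_sections(old: str, new: str) -> set[str]:
--     a = _split_sections(old)
--     b = _split_sections(new)
--     return {h for h in a.keys() | b.keys() if a.get(h, "") != b.get(h, "")}
-- ===== Notes on version B (the rewrite author's own statement) =====
-- stated objective: alternative
-- what changed: A makes a stateful line-by-line pass carrying a `current` heading and a dict of line lists that is joined afterwards; B instead chunks the line list into (heading, body-block) extents with an inner scan-to-next-heading, merging each whole block's text into a string dict at once.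
import Mathlib
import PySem

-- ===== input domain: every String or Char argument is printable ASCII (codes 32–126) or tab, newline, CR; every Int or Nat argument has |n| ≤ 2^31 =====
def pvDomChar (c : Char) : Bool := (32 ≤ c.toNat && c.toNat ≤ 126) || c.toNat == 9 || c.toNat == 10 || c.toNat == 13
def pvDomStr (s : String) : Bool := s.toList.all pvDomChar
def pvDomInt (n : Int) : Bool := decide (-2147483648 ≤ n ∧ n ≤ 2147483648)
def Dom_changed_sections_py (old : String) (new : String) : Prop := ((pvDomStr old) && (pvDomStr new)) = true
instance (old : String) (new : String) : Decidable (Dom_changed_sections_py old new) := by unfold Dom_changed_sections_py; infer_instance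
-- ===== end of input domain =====

-- B replaces A's stateful line-by-line pass (a `current` heading plus a dict of line lists joined
-- afterwards) by chunking the lines into (heading, body-block) extents and merging each whole block
-- into a string-valued dict at once; same return value (a set, order immaterial), no speed claim.

-- ===== PORT A =====
-- shared library primitive of both Pythons: str.splitlines(keepends=True), hand-ported because
-- PySem.Str.splitlines drops the endings; exact on the ASCII domain, where the only line breaks
-- Python recognises are '\n', '\r\n' and '\r'.
def pvTakeLine : List Char → List Char × List Char
  | [] => ([], [])
  | '\n' :: r => (['\n'], r)
  | '\r' :: '\n' :: r => (['\r', '\n'], r)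
  | '\r' :: r => (['\r'], r)
  | c :: r => (c :: (pvTakeLine r).1, (pvTakeLine r).2)

theorem pvTakeLine_snd_lt : ∀ cs : List Char, cs ≠ [] → (pvTakeLine cs).2.length < cs.length := by
  intro cs h
  fun_induction pvTakeLine cs with
  | case1 => exact absurd rfl h
  | case2 r => show r.length < r.length + 1; omega
  | case3 r => show r.length < r.length + 2; omega
  | case4 r _ => show r.length < r.length + 1; omega
  | case5 c r g1 g2 g3 ih =>
    cases r with
    | nil => show (pvTakeLine []).2.length < 1; decide
    | cons a t =>
      have h2 := ih (List.cons_ne_nil a t)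
      show (pvTakeLine (a :: t)).2.length < (a :: t).length + 1
      omega

def pvSplitKE : List Char → List (List Char)
  | [] => []
  | c :: r => (pvTakeLine (c :: r)).1 :: pvSplitKE (pvTakeLine (c :: r)).2
termination_by cs => cs.length
decreasing_by exact pvTakeLine_snd_lt (c :: r) (by simp)

def pvH2 : List Char := ['#', '#', ' ']

-- one iteration of A's `for line in lines` loop; state = (sections, current).
-- `sections[current].append(line)` is ported as `modify current []` — exact here because on every
-- reachable state `current`, when not none, is a key of `sections` (it was setdefault'ed).
def pvAStep (st : PySem.Dict (List Char) (List (List Char)) × Option (List Char))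
    (line : List Char) : PySem.Dict (List Char) (List (List Char)) × Option (List Char) :=
  if PySem.Chars.startswith line pvH2 then
    let c := PySem.Chars.stripChars line ['\n']
    (st.1.setdefault c [], some c)
  else
    match st.2 with
    | some c => (st.1.modify c [] (fun v => v ++ [line]), st.2)
    | none => st

-- _split_h2_sections of A
def pvSplitA (text : List Char) : PySem.Dict (List Char) (List Char) :=
  let sections := ((pvSplitKE text).foldl pvAStep (PySem.Dict.empty, none)).1
  sections.items.foldl
    (fun acc p => acc.insert p.1 (PySem.Chars.strip (PySem.Chars.join [] p.2))) PySem.Dict.empty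

def changed_sections_py (old : String) (new : String) : List String :=
  let a := pvSplitA old.toList
  let b := pvSplitA new.toList
  let hs := PySem.Set.union (PySem.Set.ofList a.keys) (PySem.Set.ofList b.keys)
  (hs.foldl (fun ch h => if a.getD h [] ≠ b.getD h [] then PySem.Set.add ch h else ch)
      PySem.Set.empty).map String.mk

-- ===== PORT B =====
-- inner `while j < n and not lines[j].startswith("## ")` scan: (lines[i+1:j], lines[j:])
def pvSpan : List (List Char) → List (List Char) × List (List Char)
  | [] => ([], [])
  | l :: ls =>
    if PySem.Chars.startswith l pvH2 then ([], l :: ls)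
    else ((pvSpan ls).1.cons l, (pvSpan ls).2)

theorem pvSpan_snd_le : ∀ ls : List (List Char), (pvSpan ls).2.length ≤ ls.length := by
  intro ls
  induction ls with
  | nil => simp [pvSpan]
  | cons l ls ih => by_cases h : PySem.Chars.startswith l pvH2 = true <;> simp [pvSpan, h] <;> omega

-- B's outer `while i < n` loop
def pvSecB : List (List Char) → PySem.Dict (List Char) (List Char) → PySem.Dict (List Char) (List Char)
  | [], sec => sec
  | l :: ls, sec =>
    if PySem.Chars.startswith l pvH2 then
      let h := PySem.Chars.stripChars l ['\n']
      pvSecB (pvSpan ls).2 (sec.insert h (sec.getD h [] ++ PySem.Chars.join [] (pvSpan ls).1))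
    else
      pvSecB ls sec
termination_by lines _ => lines.length
decreasing_by
  · exact Nat.lt_succ_of_le (pvSpan_snd_le ls)
  · exact Nat.lt_succ_self _

-- _split_sections of B
def pvSplitB (text : List Char) : PySem.Dict (List Char) (List Char) :=
  let sec := pvSecB (pvSplitKE text) PySem.Dict.empty
  sec.items.foldl (fun acc p => acc.insert p.1 (PySem.Chars.strip p.2)) PySem.Dict.empty

def changed_sections_py_alt (old : String) (new : String) : List String :=
  let a := pvSplitB old.toList
  let b := pvSplitB new.toList
  let hs := PySem.Set.union (PySem.Set.ofList a.keys) (PySem.Set.ofList b.keys)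
  (PySem.Set.ofList (hs.filter (fun h => decide (a.getD h [] ≠ b.getD h [])))).map String.mk

-- ===== PRECONDITION & SPEC =====
def Spec_changed_sections_py (old : String) (new : String) (out : List String) : Prop := out = changed_sections_py_alt old new
instance (old : String) (new : String) (out : List String) : Decidable (Spec_changed_sections_py old new out) := by unfold Spec_changed_sections_py; infer_instance

-- ===== CLAIM (what is proved, stated in full; the proofs are below) =====
def Claim_equal_changed_sections_py : Prop := ∀ (old : String) (new : String), Dom_changed_sections_py old new → Spec_changed_sections_py old new (changed_sections_py old new)

-- ===== LEMMAS AND PROOFS =====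

-- value-joining morphism from A's line-list dict to B's string dict
def pvJ (d : PySem.Dict (List Char) (List (List Char))) : PySem.Dict (List Char) (List Char) :=
  ⟨d.items.map (fun p => (p.1, PySem.Chars.join [] p.2))⟩

theorem pvJoin_nil_flatten (l : List (List Char)) : PySem.Chars.join [] l = l.flatten := by
  induction l with
  | nil => simp [PySem.Chars.join_nil]
  | cons x xs ih =>
    cases xs with
    | nil => simp [PySem.Chars.join_singleton]
    | cons y ys => rw [PySem.Chars.join_cons_cons]; simp_all

theorem pvJoin_nil_append (a b : List (List Char)) :
    PySem.Chars.join [] (a ++ b) = PySem.Chars.join [] a ++ PySem.Chars.join [] b := by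
  simp [pvJoin_nil_flatten]

theorem pvMapReplace_of_forall {κ ν : Type} [BEq κ] (l : List (κ × ν)) (k : κ) (v : ν)
    (h : ∀ q ∈ l, (q.1 == k) = false) :
    l.map (fun p => if p.1 == k then (k, v) else p) = l := by
  induction l with
  | nil => rfl
  | cons p ps ih => simp [h p (by simp), ih (fun q hq => h q (by simp [hq]))]

theorem pvMapReplace_not_contains {κ ν : Type} [BEq κ] (d : PySem.Dict κ ν) (k : κ) (v : ν)
    (h : d.contains k = false) :
    d.items.map (fun p => if p.1 == k then (k, v) else p) = d.items := by
  refine pvMapReplace_of_forall _ _ _ (fun q hq => ?_)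
  obtain ⟨items⟩ := d
  simp only [PySem.Dict.contains, List.any_eq_false] at h
  simpa using h q hq

theorem pvInsert_insert_self {κ ν : Type} [BEq κ] [LawfulBEq κ] (d : PySem.Dict κ ν) (k : κ) (v w : ν) :
    (d.insert k v).insert k w = d.insert k w := by
  by_cases hc : d.contains k = true
  · have h1 := PySem.Dict.contains_insert_self d k v
    simp only [PySem.Dict.insert, hc, if_true] at h1 ⊢
    rw [if_pos h1, List.map_map]
    congr 1
    apply List.map_congr_left
    intro p _
    by_cases hp : (p.1 == k) = true <;> simp [hp]
  · have h1 := PySem.Dict.contains_insert_self d k v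
    simp only [PySem.Dict.insert, hc, Bool.false_eq_true, if_false] at h1 ⊢
    rw [if_pos h1, List.map_append,
      pvMapReplace_not_contains d k w (by simpa using hc)]
    simp

theorem pvInsert_getD_self {κ ν : Type} [BEq κ] [LawfulBEq κ] (d : PySem.Dict κ ν) (k : κ) (dflt : ν)
    (hc : d.contains k = true) (hn : d.keys.Nodup) :
    d.insert k (d.getD k dflt) = d := by
  simp only [PySem.Dict.insert, hc, if_true]
  obtain ⟨items⟩ := d
  simp only [PySem.Dict.contains, PySem.Dict.getD, PySem.Dict.get?,
    PySem.Dict.keys] at *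
  congr 1
  induction items with
  | nil => rfl
  | cons p ps ih =>
    by_cases hp : (p.1 == k) = true
    · have hk : k = p.1 := (eq_of_beq hp).symm
      have htail : ∀ q ∈ ps, (q.1 == k) = false := by
        intro q hq
        have : q.1 ≠ k := by
          subst hk
          simp only [List.map_cons, List.nodup_cons] at hn
          exact fun he => hn.1 (he ▸ List.mem_map_of_mem hq)
        simpa using this
      simp only [List.find?_cons, hp]
      simp only [List.map_cons, hp, if_true]
      rw [pvMapReplace_of_forall ps k _ htail]
      simp [hk]
    · simp only [List.find?_cons, hp]
      simp only [List.map_cons, hp, if_false]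
      simp only [List.any_cons, hp, Bool.false_or] at hc
      simp only [List.map_cons, List.nodup_cons] at hn
      rw [ih hc hn.2]
      simp

theorem pvSetdefault_insert {κ ν : Type} [BEq κ] [LawfulBEq κ] (d : PySem.Dict κ ν) (k : κ) (v w : ν) :
    (d.setdefault k v).insert k w = d.insert k w := by
  by_cases hc : d.contains k = true
  · rw [PySem.Dict.setdefault_of_contains d v hc]
  · have hsd : d.setdefault k v = ⟨d.items ++ [(k, v)]⟩ := by
      simp [PySem.Dict.setdefault, hc]
    have hc2 : (d.setdefault k v).contains k = true := by
      simp [PySem.Dict.contains_setdefault]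
    simp only [PySem.Dict.insert, hc, hc2, if_true, if_false, Bool.false_eq_true]
    rw [hsd]
    simp only [PySem.Dict.items, List.map_append]
    rw [pvMapReplace_not_contains d k w (by simpa using hc)]
    simp

theorem pvNodup_keys_setdefault {κ ν : Type} [BEq κ] [LawfulBEq κ] (d : PySem.Dict κ ν) (k : κ) (v : ν)
    (hn : d.keys.Nodup) : (d.setdefault k v).keys.Nodup := by
  rw [PySem.Dict.keys_setdefault]
  by_cases hc : d.contains k = true
  · simpa [hc]
  · have : k ∉ d.keys := fun hm => hc ((PySem.Dict.contains_iff_mem_keys d k).mpr hm)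
    simp only [hc, Bool.false_eq_true, if_false]
    refine List.Nodup.append hn (List.nodup_singleton k) ?_
    intro a ha hb
    simp only [List.mem_singleton] at hb
    subst hb
    exact this ha

theorem pvJ_contains (d : PySem.Dict (List Char) (List (List Char))) (k : List Char) :
    (pvJ d).contains k = d.contains k := by
  simp [pvJ, PySem.Dict.contains, List.any_map, Function.comp_def]

theorem pvJ_getD (d : PySem.Dict (List Char) (List (List Char))) (k : List Char) :
    (pvJ d).getD k [] = PySem.Chars.join [] (d.getD k []) := by
  simp only [pvJ, PySem.Dict.getD, PySem.Dict.get?, PySem.Dict.items]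
  rw [List.find?_map]
  cases hf : List.find? (fun p => p.1 == k) d.items with
  | none => simp [hf, Function.comp_def, PySem.Chars.join_nil]
  | some p => simp [hf, Function.comp_def]

theorem pvJ_insert (d : PySem.Dict (List Char) (List (List Char))) (k : List Char) (v : List (List Char)) :
    pvJ (d.insert k v) = (pvJ d).insert k (PySem.Chars.join [] v) := by
  by_cases hc : d.contains k = true
  · simp only [PySem.Dict.insert, hc, pvJ_contains, if_true]
    simp only [pvJ, List.map_map]
    congr 1
    apply List.map_congr_left
    intro p _
    by_cases hp : p.1 = k <;> simp [hp]
  · simp only [PySem.Dict.insert, hc, pvJ_contains, Bool.false_eq_true, if_false]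
    simp [pvJ]

theorem pvJ_setdefault (d : PySem.Dict (List Char) (List (List Char))) (k : List Char) :
    pvJ (d.setdefault k []) = (pvJ d).setdefault k [] := by
  by_cases hc : d.contains k = true
  · rw [PySem.Dict.setdefault_of_contains d [] hc,
      PySem.Dict.setdefault_of_contains (pvJ d) [] (by rw [pvJ_contains]; exact hc)]
  · simp only [PySem.Dict.setdefault, hc, pvJ_contains, Bool.false_eq_true, if_false]
    simp [pvJ, PySem.Chars.join_nil]

-- the body of one block, processed line by line by A, appends as a whole
theorem pvBodyA (body : List (List Char)) : ∀ (d : PySem.Dict (List Char) (List (List Char))) (c : List Char),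
    d.contains c = true → d.keys.Nodup →
    (∀ x ∈ body, PySem.Chars.startswith x pvH2 = false) →
    body.foldl pvAStep (d, some c) = (d.insert c (d.getD c [] ++ body), some c) := by
  induction body with
  | nil =>
    intro d c hc hn _
    simp [pvInsert_getD_self d c [] hc hn]
  | cons x body ih =>
    intro d c hc hn hb
    have hx : PySem.Chars.startswith x pvH2 = false := hb x (by simp)
    simp only [List.foldl_cons]
    have hstep : pvAStep (d, some c) x = (d.insert c (d.getD c [] ++ [x]), some c) := by
      simp [pvAStep, hx, PySem.Dict.modify]
    rw [hstep, ih _ c (PySem.Dict.contains_insert_self d c _)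
      (PySem.Dict.nodup_keys_insert d c _ hn) (fun y hy => hb y (by simp [hy]))]
    rw [PySem.Dict.getD_insert_self, pvInsert_insert_self]
    simp

theorem pvSpan_append (ls : List (List Char)) : (pvSpan ls).1 ++ (pvSpan ls).2 = ls := by
  induction ls with
  | nil => rfl
  | cons l ls ih =>
    by_cases h : PySem.Chars.startswith l pvH2 = true <;> simp [pvSpan, h, ih]

theorem pvSpan_body (ls : List (List Char)) :
    ∀ x ∈ (pvSpan ls).1, PySem.Chars.startswith x pvH2 = false := by
  induction ls with
  | nil => simp [pvSpan]
  | cons l ls ih =>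
    by_cases h : PySem.Chars.startswith l pvH2 = true
    · simp [pvSpan, h]
    · intro x hx
      simp only [pvSpan, h, Bool.false_eq_true, if_false, List.mem_cons] at hx
      rcases hx with rfl | hx
      · simpa using h
      · exact ih x hx

theorem pvSpan_rest (ls : List (List Char)) :
    (pvSpan ls).2 = [] ∨ ∃ l t, (pvSpan ls).2 = l :: t ∧ PySem.Chars.startswith l pvH2 = true := by
  induction ls with
  | nil => left; rfl
  | cons l ls ih =>
    by_cases h : PySem.Chars.startswith l pvH2 = true
    · right; exact ⟨l, ls, by simp [pvSpan, h], h⟩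
    · simpa [pvSpan, h] using ih

-- main invariant: at a block boundary, B's chunked recursion computes pvJ of A's loop state
theorem pvMain : ∀ (n : Nat) (lines : List (List Char)), lines.length ≤ n →
    ∀ (d : PySem.Dict (List Char) (List (List Char))) (cur : Option (List Char)),
    d.keys.Nodup →
    (cur = none ∨ lines = [] ∨ ∃ l ls, lines = l :: ls ∧ PySem.Chars.startswith l pvH2 = true) →
    pvJ ((lines.foldl pvAStep (d, cur)).1) = pvSecB lines (pvJ d) := by
  intro n
  induction n with
  | zero =>
    intro lines hl d cur hn _
    have hnil : lines = [] := List.eq_nil_of_length_eq_zero (Nat.le_zero.mp hl)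
    subst hnil
    simp [pvSecB]
  | succ n ih =>
    intro lines hl d cur hn hcond
    cases lines with
    | nil => simp [pvSecB]
    | cons l ls =>
      by_cases hl2 : PySem.Chars.startswith l pvH2 = true
      · have hstep : pvAStep (d, cur) l
            = (d.setdefault (PySem.Chars.stripChars l ['\n']) [],
               some (PySem.Chars.stripChars l ['\n'])) := by
          simp [pvAStep, hl2]
        have hcontains : (d.setdefault (PySem.Chars.stripChars l ['\n']) []).contains
            (PySem.Chars.stripChars l ['\n']) = true := by
          simp [PySem.Dict.contains_setdefault]
        have hnodup := pvNodup_keys_setdefault d (PySem.Chars.stripChars l ['\n']) [] hn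
        have hrestlen : (pvSpan ls).2.length ≤ n := by
          have h1 := pvSpan_snd_le ls
          simp only [List.length_cons] at hl
          omega
        rw [List.foldl_cons, hstep]
        conv_lhs => rw [← pvSpan_append ls]
        rw [List.foldl_append,
          pvBodyA (pvSpan ls).1 _ _ hcontains hnodup (pvSpan_body ls),
          ih (pvSpan ls).2 hrestlen _ _
            (PySem.Dict.nodup_keys_insert _ _ _ hnodup) (Or.inr (pvSpan_rest ls))]
        rw [show pvSecB (l :: ls) (pvJ d)
            = pvSecB (pvSpan ls).2 ((pvJ d).insert (PySem.Chars.stripChars l ['\n'])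
                ((pvJ d).getD (PySem.Chars.stripChars l ['\n']) []
                  ++ PySem.Chars.join [] (pvSpan ls).1)) from by
          rw [pvSecB]; simp [hl2]]
        congr 1
        rw [pvJ_insert, pvJ_setdefault, pvSetdefault_insert, pvJoin_nil_append,
          PySem.Dict.getD_setdefault_self, ← pvJ_getD]
      · have hcur : cur = none := by
          rcases hcond with h | h | ⟨l2, ls2, heq, hs⟩
          · exact h
          · exact absurd h (List.cons_ne_nil l ls)
          · rw [List.cons.injEq] at heq
            exact absurd (heq.1 ▸ hs) (by simp [hl2])
        subst hcur
        have hstep : pvAStep (d, none) l = (d, none) := by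
          simp [pvAStep, hl2]
        rw [List.foldl_cons, hstep,
          ih ls (by simpa using Nat.le_of_succ_le_succ (by simpa using hl)) d none hn (Or.inl rfl),
          show pvSecB (l :: ls) (pvJ d) = pvSecB ls (pvJ d) from by rw [pvSecB]; simp [hl2]]

theorem pvSplit_eq (text : List Char) : pvSplitA text = pvSplitB text := by
  have h := pvMain (pvSplitKE text).length (pvSplitKE text) le_rfl PySem.Dict.empty none
    (by simp [PySem.Dict.keys, PySem.Dict.empty]) (Or.inl rfl)
  have hempty : pvJ PySem.Dict.empty = PySem.Dict.empty := rfl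
  rw [hempty] at h
  show ((pvSplitKE text).foldl pvAStep (PySem.Dict.empty, none)).1.items.foldl
      (fun acc p => acc.insert p.1 (PySem.Chars.strip (PySem.Chars.join [] p.2))) PySem.Dict.empty
    = (pvSecB (pvSplitKE text) PySem.Dict.empty).items.foldl
      (fun acc p => acc.insert p.1 (PySem.Chars.strip p.2)) PySem.Dict.empty
  rw [← h]
  simp only [pvJ, PySem.Dict.items, List.foldl_map]

theorem pvFoldIf_eq_filter {α : Type} [BEq α] (u : List α) (q : α → Prop) [DecidablePred q] :
    ∀ s : PySem.Set α,
      u.foldl (fun ch h => if q h then PySem.Set.add ch h else ch) s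
        = (u.filter (fun h => decide (q h))).foldl PySem.Set.add s := by
  induction u with
  | nil => intro s; rfl
  | cons a u ih =>
    intro s
    by_cases h : q a <;> simp [h, ih]

-- ===== VERDICT (by name: the statement is the Claim_ definition above) =====
theorem changed_sections_py_spec : Claim_equal_changed_sections_py := by
  intro old new _
  show changed_sections_py old new = changed_sections_py_alt old new
  show ((PySem.Set.union (PySem.Set.ofList (pvSplitA old.toList).keys)
          (PySem.Set.ofList (pvSplitA new.toList).keys)).foldl
        (fun ch h => if (pvSplitA old.toList).getD h [] ≠ (pvSplitA new.toList).getD h []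
          then PySem.Set.add ch h else ch) PySem.Set.empty).map String.mk
    = (PySem.Set.ofList
        ((PySem.Set.union (PySem.Set.ofList (pvSplitB old.toList).keys)
          (PySem.Set.ofList (pvSplitB new.toList).keys)).filter
        (fun h => decide ((pvSplitB old.toList).getD h [] ≠ (pvSplitB new.toList).getD h [])))).map String.mk
  rw [pvSplit_eq old.toList, pvSplit_eq new.toList, pvFoldIf_eq_filter,
    show (PySem.Set.empty : PySem.Set (List Char)) = [] from rfl,
    ← PySem.Set.ofList_eq_foldl]
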